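-- pv_equiv track=rewrite | github.com/TheKillerAboy/programming-olympiad | Python_Solutions/CodeForces/#579/Equal_Rectangles.py | can_make_equal_rectangles
-- ===== SOURCE A (Python) =====
-- def get_allrects(values):
--     if len(values) == 2:
--         yield [tuple(values)]
--     else:
--         for i in range(len(values)-1):
--             for j in range(i+1,len(values)):
--                 values_copy = values.copy()
--                 a,b = values_copy[i],values_copy[j]
--                 del values_copy[i]
--                 del values_copy[j-1]
--                 for rects in get_allrects(values_copy):
--                     yield [(a,b),*rects]
--
-- def can_make_equal_rectangles(n,sticks):
--     unique = set()
--     pairs = []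
--     for value in sticks:
--         if(value in unique):
--             unique.remove(value)
--         else:
--             pairs.append(value)
--             unique.add(value)
--     for rects_group in get_allrects(pairs):
--         area = rects_group[0][0]*rects_group[0][1]
--         if len(list(filter(lambda rect: rect[0]*rect[1]!=area,rects_group[1:]))) == 0:
--             return True
--     return False
-- ===== SOURCE B (Python) =====
-- def _pair_off(values, P):
--     # pair the first element with each candidate whose product is P, recurse
--     if not values:
--         return True
--     a = values[0]
--     rest = values[1:]
--     for j in range(len(rest)):
--         if a * rest[j] == P and _pair_off(rest[:j] + rest[j + 1:], P):
--             return True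
--     return False
--
-- def can_make_equal_rectangles(n, sticks):
--     unique = set()
--     pairs = []
--     for value in sticks:
--         if value in unique:
--             unique.remove(value)
--         else:
--             pairs.append(value)
--             unique.add(value)
--     rest = pairs[1:]
--     return any(_pair_off(rest[:j] + rest[j + 1:], pairs[0] * rest[j])
--                for j in range(len(rest)))
-- ===== Notes on version B (the rewrite author's own statement) =====
-- stated objective: alternative
-- what changed: A enumerates every complete pairing of the sticks (via a recursive generator) and only then filters for equal areas; B does a depth-first search that always pairs the first remaining stick and prunes immediately when a candidate pair's product differs from the target area.
import Mathlib
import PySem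

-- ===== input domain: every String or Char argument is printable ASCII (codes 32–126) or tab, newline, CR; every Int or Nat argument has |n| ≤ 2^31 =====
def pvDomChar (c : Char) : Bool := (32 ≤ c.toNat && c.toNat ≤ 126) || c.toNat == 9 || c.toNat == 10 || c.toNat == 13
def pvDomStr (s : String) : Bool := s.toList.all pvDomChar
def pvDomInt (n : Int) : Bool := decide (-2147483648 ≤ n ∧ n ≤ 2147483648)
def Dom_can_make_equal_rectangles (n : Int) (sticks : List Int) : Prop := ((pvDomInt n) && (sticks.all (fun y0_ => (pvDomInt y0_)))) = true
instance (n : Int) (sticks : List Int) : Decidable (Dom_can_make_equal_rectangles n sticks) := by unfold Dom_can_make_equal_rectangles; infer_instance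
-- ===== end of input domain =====

-- B replaces A's exhaustive enumeration of all complete pairings with a depth-first
-- search that always pairs the first remaining stick and prunes on the target product
-- (objective: alternative algorithm).

-- ===== PORT A =====
-- port of get_allrects: yields every way to split `values` into ordered pairs (i < j).
-- structural recursion on a fuel argument (= values.length, always sufficient: each
-- recursive call shortens the list by 2); the Python recursion itself is untouched
def getAllRectsFuel : Nat → List Int → List (List (Int × Int))
  | 0, _ => []
  | fuel + 1, values =>
    if values.length = 2 then
      [[(values.getD 0 0, values.getD 1 0)]]
    else
      (List.range (values.length - 1)).flatMap (fun i =>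
        (List.range' (i + 1) (values.length - (i + 1))).flatMap (fun j =>
          (getAllRectsFuel fuel ((values.eraseIdx i).eraseIdx (j - 1))).map
            (fun rects => (values.getD i 0, values.getD j 0) :: rects)))

def getAllRects (values : List Int) : List (List (Int × Int)) :=
  getAllRectsFuel values.length values

def can_make_equal_rectangles (n : Int) (sticks : List Int) : Bool :=
  let st := sticks.foldl
    (fun (acc : PySem.Set Int × List Int) value =>
      if PySem.Set.contains acc.1 value then
        ((PySem.Set.remove? acc.1 value).getD acc.1, acc.2)
      else
        (PySem.Set.add acc.1 value, acc.2 ++ [value]))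
    (PySem.Set.empty, [])
  (getAllRects st.2).any (fun rects_group =>
    ((rects_group.drop 1).filter (fun rect =>
        rect.1 * rect.2 != (rects_group.getD 0 (0, 0)).1 * (rects_group.getD 0 (0, 0)).2)).length == 0)

-- ===== PORT B =====
-- port of _pair_off: pair values[0] with each candidate of product P, recurse.
-- structural fuel recursion (fuel = values.length, always sufficient)
def pairOffFuel : Nat → List Int → Int → Bool
  | _, [], _ => true
  | 0, _ :: _, _ => false
  | fuel + 1, a :: rest, P =>
    (List.range rest.length).any (fun j =>
      a * rest.getD j 0 == P && pairOffFuel fuel (rest.take j ++ rest.drop (j + 1)) P)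

def pairOff (values : List Int) (P : Int) : Bool :=
  pairOffFuel values.length values P

def can_make_equal_rectangles_alt (n : Int) (sticks : List Int) : Bool :=
  let st := sticks.foldl
    (fun (acc : PySem.Set Int × List Int) value =>
      if PySem.Set.contains acc.1 value then
        ((PySem.Set.remove? acc.1 value).getD acc.1, acc.2)
      else
        (PySem.Set.add acc.1 value, acc.2 ++ [value]))
    (PySem.Set.empty, [])
  let rest := st.2.drop 1
  (List.range rest.length).any (fun j =>
    pairOff (rest.take j ++ rest.drop (j + 1)) (st.2.getD 0 0 * rest.getD j 0))

-- ===== PRECONDITION & SPEC =====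
def Spec_can_make_equal_rectangles (n : Int) (sticks : List Int) (out : Bool) : Prop := out = can_make_equal_rectangles_alt n sticks
instance (n : Int) (sticks : List Int) (out : Bool) : Decidable (Spec_can_make_equal_rectangles n sticks out) := by unfold Spec_can_make_equal_rectangles; infer_instance

-- ===== CLAIM (what is proved, stated in full; the proofs are below) =====
def Claim_equal_can_make_equal_rectangles : Prop := ∀ (n : Int) (sticks : List Int), Dom_can_make_equal_rectangles n sticks → Spec_can_make_equal_rectangles n sticks (can_make_equal_rectangles n sticks)

-- ===== LEMMAS AND PROOFS =====

-- the sticks of a pairing, flattened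
def flatRects (rg : List (Int × Int)) : List Int := rg.flatMap (fun r => [r.1, r.2])

-- "the multiset can be split into pairs, each of product P"
inductive PairM : Multiset Int → Int → Prop where
  | nil (P : Int) : PairM 0 P
  | cons (P a b : Int) (s : Multiset Int) : a * b = P → PairM s P → PairM (a ::ₘ b ::ₘ s) P

theorem PairM.card_even {t : Multiset Int} {P : Int} (h : PairM t P) : t.card % 2 = 0 := by
  induction h with
  | nil => simp
  | cons P a b s hab hs ih => simp only [Multiset.card_cons]; omega

-- any element of a pairable multiset can be made the first pair's first component
theorem PairM.head_extract {t : Multiset Int} {P : Int} (h : PairM t P) :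
    ∀ (x : Int) (s : Multiset Int), t = x ::ₘ s →
    ∃ y u, s = y ::ₘ u ∧ x * y = P ∧ PairM u P := by
  induction h with
  | nil P => intro x s hx; exact absurd hx (Multiset.zero_ne_cons)
  | cons P a b s' hab hps ih =>
    intro x s hx
    have hxmem : x ∈ (a ::ₘ b ::ₘ s') := hx ▸ Multiset.mem_cons_self x s
    rcases Multiset.mem_cons.mp hxmem with hxa | hx2
    · subst hxa
      exact ⟨b, s', ((Multiset.cons_inj_right x).mp hx).symm, hab, hps⟩
    · rcases Multiset.mem_cons.mp hx2 with hxb | hxs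
      · subst hxb
        have h2 : x ::ₘ s = x ::ₘ a ::ₘ s' := hx.symm.trans (Multiset.cons_swap a x s')
        exact ⟨a, s', (Multiset.cons_inj_right x).mp h2, by rw [mul_comm]; exact hab, hps⟩
      · obtain ⟨u0, hu0⟩ : ∃ u0, s' = x ::ₘ u0 := ⟨s'.erase x, (Multiset.cons_erase hxs).symm⟩
        obtain ⟨y, u1, hyu, hxy, hp⟩ := ih x u0 hu0
        have h2 : x ::ₘ s = x ::ₘ y ::ₘ a ::ₘ b ::ₘ u1 := by
          rw [← hx, hu0, hyu]
          simp only [← Multiset.singleton_add]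
          abel
        exact ⟨y, a ::ₘ b ::ₘ u1, (Multiset.cons_inj_right x).mp h2, hxy,
          PairM.cons P a b u1 hab hp⟩


theorem flatRects_cons (r : Int × Int) (rg : List (Int × Int)) :
    flatRects (r :: rg) = r.1 :: r.2 :: flatRects rg := rfl

theorem flat_pair (rg : List (Int × Int)) (P : Int) (h : ∀ r ∈ rg, r.1 * r.2 = P) :
    PairM ↑(flatRects rg) P := by
  induction rg with
  | nil => exact PairM.nil P
  | cons r t ih =>
    rw [flatRects_cons]
    have hcoe : (↑(r.1 :: r.2 :: flatRects t) : Multiset Int) = r.1 ::ₘ r.2 ::ₘ ↑(flatRects t) := by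
      simp
    rw [hcoe]
    exact PairM.cons P r.1 r.2 _ (h r (List.mem_cons_self ..)) (ih (fun r hr => h r (List.mem_cons_of_mem _ hr)))

theorem perm_idx (l : List Int) (j : ℕ) (h : j < l.length) :
    (↑l : Multiset Int) = l[j] ::ₘ ↑(l.eraseIdx j) := by
  have hp := List.getElem_cons_eraseIdx_perm h
  have := Multiset.coe_eq_coe.mpr hp
  rw [← this]
  simp

theorem erase2_decomp (v : List Int) (i j : ℕ) (hij : i < j) (hj : j < v.length) :
    (↑v : Multiset Int) =
      v[i]'(Nat.lt_trans hij hj) ::ₘ v[j]'hj ::ₘ ↑((v.eraseIdx i).eraseIdx (j - 1)) := by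
  have h1 : i < v.length := Nat.lt_trans hij hj
  have hlen : (v.eraseIdx i).length = v.length - 1 := by
    rw [List.length_eraseIdx]; rw [if_pos h1]
  have hj1 : j - 1 < (v.eraseIdx i).length := by omega
  have hget : (v.eraseIdx i)[j - 1]'hj1 = v[j]'hj := by
    rw [List.getElem_eraseIdx]
    rw [dif_neg (by omega)]
    congr 1
    omega
  rw [perm_idx v i h1, perm_idx (v.eraseIdx i) (j - 1) hj1, hget]

theorem getAllRectsFuel_sound (fuel : ℕ) : ∀ v : List Int, v.length ≤ fuel →
    ∀ rg ∈ getAllRectsFuel fuel v, rg ≠ [] ∧ (↑(flatRects rg) : Multiset Int) = ↑v := by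
  induction fuel with
  | zero =>
    intro v hv rg hrg
    simp [getAllRectsFuel] at hrg
  | succ n ih =>
    intro v hv rg hrg
    simp only [getAllRectsFuel] at hrg
    by_cases h2 : v.length = 2
    · rw [if_pos h2] at hrg
      obtain ⟨x, y, rfl⟩ := List.length_eq_two.mp h2
      simp at hrg
      subst hrg
      refine ⟨by simp, ?_⟩
      simp [flatRects]
    · rw [if_neg h2] at hrg
      simp only [List.mem_flatMap, List.mem_map] at hrg
      obtain ⟨i, hi, j, hj, rg', hrg', hrgeq⟩ := hrg
      have hi' : i < v.length - 1 := List.mem_range.mp hi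
      have hj' : i + 1 ≤ j ∧ j < i + 1 + (v.length - (i + 1)) := List.mem_range'_1.mp hj
      have hij : i < j := by omega
      have hjv : j < v.length := by omega
      have hvc : ((v.eraseIdx i).eraseIdx (j - 1)).length ≤ n := by
        rw [List.length_eraseIdx, List.length_eraseIdx]
        split <;> split <;> omega
      obtain ⟨hne, hflat⟩ := ih _ hvc rg' hrg'
      subst hrgeq
      refine ⟨by simp, ?_⟩
      rw [flatRects_cons]
      have hcoe : (↑(v.getD i 0 :: v.getD j 0 :: flatRects rg') : Multiset Int) =
          v.getD i 0 ::ₘ v.getD j 0 ::ₘ ↑(flatRects rg') := by simp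
      rw [hcoe, hflat, List.getD_eq_getElem v 0 (Nat.lt_trans hij hjv), List.getD_eq_getElem v 0 hjv]
      exact (erase2_decomp v i j hij hjv).symm

theorem getAllRectsFuel_complete (fuel : ℕ) : ∀ v : List Int, v.length ≤ fuel → ∀ P : Int,
    2 ≤ v.length → PairM ↑v P →
    ∃ rg ∈ getAllRectsFuel fuel v, rg ≠ [] ∧ ∀ r ∈ rg, r.1 * r.2 = P := by
  induction fuel with
  | zero => intro v hv P h2 _; omega
  | succ n ih =>
    intro v hv P h2 hp
    by_cases hl2 : v.length = 2
    · obtain ⟨x, y, rfl⟩ := List.length_eq_two.mp hl2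
      have hcoe : (↑[x, y] : Multiset Int) = x ::ₘ ↑[y] := rfl
      obtain ⟨y', u, hyu, hxy, _⟩ := hp.head_extract x ↑[y] hcoe
      have hy' : y = y' ∧ u = 0 := by
        have h1 : ({y} : Multiset Int) = y' ::ₘ u := by rw [← Multiset.coe_singleton]; exact hyu
        exact (Multiset.singleton_eq_cons_iff u).mp h1
      refine ⟨[(x, y)], ?_, by simp, ?_⟩
      · simp only [getAllRectsFuel]
        simp
      · intro r hr
        simp at hr
        subst hr
        simp only
        rw [hy'.1]
        exact hxy
    · have hl3 : 3 ≤ v.length := by omega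
      obtain ⟨a, rest, rfl⟩ : ∃ a rest, v = a :: rest := by
        cases v with
        | nil => simp at h2
        | cons a rest => exact ⟨a, rest, rfl⟩
      have hcoe : (↑(a :: rest) : Multiset Int) = a ::ₘ ↑rest := rfl
      obtain ⟨y, u, hyu, hxy, hpu⟩ := hp.head_extract a ↑rest hcoe
      have hymem : y ∈ rest := by
        have : y ∈ (↑rest : Multiset Int) := hyu ▸ Multiset.mem_cons_self y u
        simpa using this
      obtain ⟨k, hk, hky⟩ := List.getElem_of_mem hymem
      have hu : (↑(rest.eraseIdx k) : Multiset Int) = u := by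
        have hpk := perm_idx rest k hk
        rw [hky] at hpk
        rw [hpk] at hyu
        exact (Multiset.cons_inj_right y).mp hyu
      have hcard : u.card = rest.length - 1 := by
        rw [← hu, Multiset.coe_card, List.length_eraseIdx, if_pos hk]
      rcases Nat.lt_or_ge (a :: rest).length 4 with h4 | h4
      · exfalso
        have := hpu.card_even
        rw [hcard] at this
        simp only [List.length_cons] at h4 hl3
        omega
      · have hvcn : (rest.eraseIdx k).length ≤ n := by
          rw [List.length_eraseIdx, if_pos hk]
          simp only [List.length_cons] at hv
          omega
        have hvc2 : 2 ≤ (rest.eraseIdx k).length := by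
          rw [List.length_eraseIdx, if_pos hk]
          simp only [List.length_cons] at h4
          omega
        have hpvc : PairM ↑(rest.eraseIdx k) P := hu ▸ hpu
        obtain ⟨rg', hrg', hne', hall'⟩ := ih _ hvcn P hvc2 hpvc
        refine ⟨((a :: rest).getD 0 0, (a :: rest).getD (k + 1) 0) :: rg', ?_, by simp, ?_⟩
        · simp only [getAllRectsFuel]
          rw [if_neg (by simpa using hl2)]
          apply List.mem_flatMap.mpr
          refine ⟨0, List.mem_range.mpr (by simp only [List.length_cons]; simp only [List.length_cons] at hl3; omega), ?_⟩
          apply List.mem_flatMap.mpr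
          refine ⟨k + 1, ?_, ?_⟩
          · rw [List.mem_range'_1]
            simp only [List.length_cons]
            omega
          · apply List.mem_map.mpr
            refine ⟨rg', ?_, rfl⟩
            simpa using hrg'
        · intro r hr
          rcases List.mem_cons.mp hr with hr | hr
          · subst hr
            simp only [List.getD_cons_zero]
            have hgd : (a :: rest).getD (k + 1) 0 = y := by
              rw [List.getD_eq_getElem _ 0 (by simpa using Nat.succ_lt_succ hk)]
              simpa using hky
            rw [hgd]
            exact hxy
          · exact hall' r hr

theorem pairOffFuel_iff (fuel : ℕ) : ∀ v : List Int, v.length ≤ fuel → ∀ P : Int,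
    (pairOffFuel fuel v P = true ↔ PairM ↑v P) := by
  induction fuel with
  | zero =>
    intro v hv P
    have hv0 : v = [] := List.eq_nil_of_length_eq_zero (by omega)
    subst hv0
    simp only [pairOffFuel]
    exact ⟨fun _ => PairM.nil P, fun _ => trivial⟩
  | succ n ih =>
    intro v hv P
    match v with
    | [] =>
      simp only [pairOffFuel]
      exact ⟨fun _ => PairM.nil P, fun _ => trivial⟩
    | a :: rest =>
      simp only [pairOffFuel]
      constructor
      · intro h
        obtain ⟨j, hjm, hj⟩ := List.any_eq_true.mp h
        have hjl : j < rest.length := List.mem_range.mp hjm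
        obtain ⟨h1, h2⟩ := Bool.and_eq_true_iff.mp hj
        have hprod : a * rest[j] = P := by
          rw [List.getD_eq_getElem rest 0 hjl] at h1
          exact beq_iff_eq.mp h1
        have hlen : (rest.take j ++ rest.drop (j + 1)).length ≤ n := by
          simp only [List.length_append, List.length_take, List.length_drop]
          simp only [List.length_cons] at hv
          omega
        have hrec : PairM ↑(rest.eraseIdx j) P := by
          rw [List.eraseIdx_eq_take_drop_succ]
          exact (ih _ hlen P).mp h2
        have hsplit : (↑(a :: rest) : Multiset Int) = a ::ₘ rest[j] ::ₘ ↑(rest.eraseIdx j) := by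
          rw [← Multiset.cons_coe a rest, perm_idx rest j hjl]
        rw [hsplit]
        exact PairM.cons P a rest[j] _ hprod hrec
      · intro h
        have hcoe : (↑(a :: rest) : Multiset Int) = a ::ₘ ↑rest := rfl
        obtain ⟨y, u, hyu, hxy, hpu⟩ := h.head_extract a ↑rest hcoe
        have hymem : y ∈ rest := by
          have : y ∈ (↑rest : Multiset Int) := hyu ▸ Multiset.mem_cons_self y u
          simpa using this
        obtain ⟨j, hjl, hjy⟩ := List.getElem_of_mem hymem
        have hu : (↑(rest.eraseIdx j) : Multiset Int) = u := by
          have hpk := perm_idx rest j hjl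
          rw [hjy] at hpk
          rw [hpk] at hyu
          exact (Multiset.cons_inj_right y).mp hyu
        apply List.any_eq_true.mpr
        refine ⟨j, List.mem_range.mpr hjl, ?_⟩
        apply Bool.and_eq_true_iff.mpr
        constructor
        · rw [List.getD_eq_getElem rest 0 hjl, hjy]
          exact beq_iff_eq.mpr hxy
        · have hlen : (rest.take j ++ rest.drop (j + 1)).length ≤ n := by
            simp only [List.length_append, List.length_take, List.length_drop]
            simp only [List.length_cons] at hv
            omega
          apply (ih _ hlen P).mpr
          rw [← List.eraseIdx_eq_take_drop_succ, hu]
          exact hpu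

theorem core_eq (ps : List Int) :
    (getAllRects ps).any (fun rects_group =>
      ((rects_group.drop 1).filter (fun rect =>
          rect.1 * rect.2 != (rects_group.getD 0 (0, 0)).1 * (rects_group.getD 0 (0, 0)).2)).length == 0)
    = (List.range (ps.drop 1).length).any (fun j =>
      pairOff ((ps.drop 1).take j ++ (ps.drop 1).drop (j + 1)) (ps.getD 0 0 * (ps.drop 1).getD j 0)) := by
  simp only [getAllRects, pairOff]
  rw [Bool.eq_iff_iff]
  constructor
  · intro h
    obtain ⟨rg, hrg, hcheck⟩ := List.any_eq_true.mp h
    obtain ⟨hne, hflat⟩ := getAllRectsFuel_sound ps.length ps le_rfl rg hrg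
    obtain ⟨r0, t, rfl⟩ : ∃ r0 t, rg = r0 :: t := by
      cases rg with
      | nil => exact absurd rfl hne
      | cons r0 t => exact ⟨r0, t, rfl⟩
    have hall : ∀ r ∈ r0 :: t, r.1 * r.2 = r0.1 * r0.2 := by
      have hfil : ∀ r ∈ t, r.1 * r.2 = r0.1 * r0.2 := by
        simp only [List.drop_succ_cons, List.drop_zero, List.getD_cons_zero, beq_iff_eq,
          List.length_eq_zero_iff, List.filter_eq_nil_iff, bne_iff_ne, ne_eq,
          Decidable.not_not] at hcheck
        exact hcheck
      intro r hr
      rcases List.mem_cons.mp hr with hr | hr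
      · rw [hr]
      · exact hfil r hr
    have hpm : PairM ↑ps (r0.1 * r0.2) := by
      have := flat_pair _ (r0.1 * r0.2) hall
      rwa [hflat] at this
    have hlen2 : 2 ≤ ps.length := by
      have hc := congrArg Multiset.card hflat
      simp only [Multiset.coe_card] at hc
      rw [flatRects_cons] at hc
      simp only [List.length_cons] at hc
      omega
    obtain ⟨a, rest, rfl⟩ : ∃ a rest, ps = a :: rest := by
      cases ps with
      | nil => simp at hlen2
      | cons a rest => exact ⟨a, rest, rfl⟩
    obtain ⟨y, u, hyu, hxy, hpu⟩ := hpm.head_extract a ↑rest rfl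
    have hymem : y ∈ rest := by
      have : y ∈ (↑rest : Multiset Int) := hyu ▸ Multiset.mem_cons_self y u
      simpa using this
    obtain ⟨k, hk, hky⟩ := List.getElem_of_mem hymem
    have hu : (↑(rest.eraseIdx k) : Multiset Int) = u := by
      have hpk := perm_idx rest k hk
      rw [hky] at hpk
      rw [hpk] at hyu
      exact (Multiset.cons_inj_right y).mp hyu
    apply List.any_eq_true.mpr
    refine ⟨k, ?_, ?_⟩
    · apply List.mem_range.mpr
      simpa using hk
    · simp only [List.drop_succ_cons, List.drop_zero, List.getD_cons_zero]
      rw [← List.eraseIdx_eq_take_drop_succ]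
      apply (pairOffFuel_iff (rest.eraseIdx k).length _ le_rfl _).mpr
      rw [hu]
      rw [List.getD_eq_getElem rest 0 hk, hky, hxy]
      exact hpu
  · intro h
    obtain ⟨j, hjm, hj⟩ := List.any_eq_true.mp h
    have hjl : j < (ps.drop 1).length := List.mem_range.mp hjm
    obtain ⟨a, rest, rfl⟩ : ∃ a rest, ps = a :: rest := by
      cases ps with
      | nil => simp at hjl
      | cons a rest => exact ⟨a, rest, rfl⟩
    simp only [List.drop_succ_cons, List.drop_zero] at hjl hj
    simp only [List.getD_cons_zero] at hj
    rw [← List.eraseIdx_eq_take_drop_succ] at hj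
    rw [List.getD_eq_getElem rest 0 hjl] at hj
    have hpair : PairM ↑(rest.eraseIdx j) (a * rest[j]) :=
      (pairOffFuel_iff (rest.eraseIdx j).length _ le_rfl _).mp hj
    have hpm : PairM ↑(a :: rest) (a * rest[j]) := by
      have hsplit : (↑(a :: rest) : Multiset Int) = a ::ₘ rest[j] ::ₘ ↑(rest.eraseIdx j) := by
        rw [← Multiset.cons_coe a rest, perm_idx rest j hjl]
      rw [hsplit]
      exact PairM.cons _ a rest[j] _ rfl hpair
    obtain ⟨rg, hrg, hne, hall⟩ := getAllRectsFuel_complete (a :: rest).length _ le_rfl _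
      (by simp only [List.length_cons]; omega) hpm
    apply List.any_eq_true.mpr
    refine ⟨rg, hrg, ?_⟩
    obtain ⟨r0, t, rfl⟩ : ∃ r0 t, rg = r0 :: t := by
      cases rg with
      | nil => exact absurd rfl hne
      | cons r0 t => exact ⟨r0, t, rfl⟩
    have h0 : r0.1 * r0.2 = a * rest[j] := hall r0 (List.mem_cons_self ..)
    simp only [List.drop_succ_cons, List.drop_zero, List.getD_cons_zero, beq_iff_eq,
      List.length_eq_zero_iff, List.filter_eq_nil_iff, bne_iff_ne, ne_eq, Decidable.not_not]
    intro r hr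
    rw [hall r (List.mem_cons_of_mem _ hr), h0]

-- ===== VERDICT (by name: the statement is the Claim_ definition above) =====
theorem can_make_equal_rectangles_spec : Claim_equal_can_make_equal_rectangles := by
  intro n sticks _
  unfold Spec_can_make_equal_rectangles
  simp only [can_make_equal_rectangles, can_make_equal_rectangles_alt]
  exact core_eq _
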